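-- pv_equiv track=rewrite | github.com/mbaljko/vault-grading-pipeline | 01_units/pipelines/pl1C_rubric_devt/python/generate-scoring-stats-for-manifest.py | build_indicator_counts_by_iteration
-- ===== SOURCE A (Python) =====
-- POSITIVE_EVIDENCE_STATUS_VALUES = {
-- 	"positive",
-- 	"present",
-- 	"yes",
-- 	"true",
-- 	"1",
-- 	"supported",
-- 	"met",
-- }
--
-- def build_indicator_counts_by_iteration(
-- 	component_ids: list[str],
-- 	iteration_history_labels: list[str],
-- 	historical_rows_by_iteration: dict[str, dict[str, list[dict[str, str]]]],
-- ) -> dict[str, dict[str, dict[str, int]]]: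
-- 	counts_by_indicator: dict[str, dict[str, dict[str, int]]] = {}
-- 	for iteration_history_label in iteration_history_labels:
-- 		for component_id in component_ids:
-- 			for row in historical_rows_by_iteration.get(iteration_history_label, {}).get(component_id, []):
-- 				indicator_id = (row.get("indicator_id") or "").strip()
-- 				if not indicator_id:
-- 					continue
-- 				counts_by_indicator.setdefault(indicator_id, {})
-- 				counts_by_indicator[indicator_id].setdefault(
-- 					iteration_history_label,
-- 					{"positive": 0, "number_scored": 0},
-- 				)
-- 				counts_by_indicator[indicator_id][iteration_history_label]["number_scored"] += 1
-- 				if is_positive_scored_row(row):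
-- 					counts_by_indicator[indicator_id][iteration_history_label]["positive"] += 1
-- 	return counts_by_indicator
--
-- def is_positive_scored_row(row: dict[str, str]) -> bool:
-- 	status = (row.get("evidence_status") or "").strip().lower()
-- 	return status in POSITIVE_EVIDENCE_STATUS_VALUES
-- ===== SOURCE B (Python) =====
-- POSITIVE_EVIDENCE_STATUS_VALUES = {
--     "positive",
--     "present",
--     "yes",
--     "true",
--     "1",
--     "supported",
--     "met",
-- }
--
-- def build_indicator_counts_by_iteration(
--     component_ids: list[str],
--     iteration_history_labels: list[str],
--     historical_rows_by_iteration: dict[str, dict[str, list[dict[str, str]]]],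
-- ) -> dict[str, dict[str, dict[str, int]]]:
--     # Stage 1: materialize every scored row as one flat (indicator_id, label, is_positive)
--     # event; no counting happens during the traversal.
--     events = [
--         ((row.get("indicator_id") or "").strip(),
--          label,
--          (row.get("evidence_status") or "").strip().lower() in POSITIVE_EVIDENCE_STATUS_VALUES)
--         for label in iteration_history_labels
--         for component_id in component_ids
--         for row in historical_rows_by_iteration.get(label, {}).get(component_id, [])
--         if (row.get("indicator_id") or "").strip()
--     ]
--     # Stage 2: bulk-count per key by scanning the event list, assembling the nested
--     # result over the distinct (indicator, label) keys in first-occurrence order.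
--     keys = [(indicator_id, label) for indicator_id, label, _ in events]
--     counts_by_indicator: dict[str, dict[str, dict[str, int]]] = {}
--     for indicator_id, label in dict.fromkeys(keys):
--         counts_by_indicator.setdefault(indicator_id, {})[label] = {
--             "positive": events.count((indicator_id, label, True)),
--             "number_scored": keys.count((indicator_id, label)),
--         }
--     return counts_by_indicator
-- ===== Notes on version B (the rewrite author's own statement) =====
-- stated objective: simpler
-- what changed: B does no counting during the traversal: it first materializes a flat list of (indicator_id, label, is_positive) events, then assembles the nested dict by bulk-counting each distinct (indicator, label) key with list.count over that event list (dedup via dict.fromkeys), instead of A's per-row setdefault/increment updates of a three-level nested dict.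
import Mathlib
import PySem

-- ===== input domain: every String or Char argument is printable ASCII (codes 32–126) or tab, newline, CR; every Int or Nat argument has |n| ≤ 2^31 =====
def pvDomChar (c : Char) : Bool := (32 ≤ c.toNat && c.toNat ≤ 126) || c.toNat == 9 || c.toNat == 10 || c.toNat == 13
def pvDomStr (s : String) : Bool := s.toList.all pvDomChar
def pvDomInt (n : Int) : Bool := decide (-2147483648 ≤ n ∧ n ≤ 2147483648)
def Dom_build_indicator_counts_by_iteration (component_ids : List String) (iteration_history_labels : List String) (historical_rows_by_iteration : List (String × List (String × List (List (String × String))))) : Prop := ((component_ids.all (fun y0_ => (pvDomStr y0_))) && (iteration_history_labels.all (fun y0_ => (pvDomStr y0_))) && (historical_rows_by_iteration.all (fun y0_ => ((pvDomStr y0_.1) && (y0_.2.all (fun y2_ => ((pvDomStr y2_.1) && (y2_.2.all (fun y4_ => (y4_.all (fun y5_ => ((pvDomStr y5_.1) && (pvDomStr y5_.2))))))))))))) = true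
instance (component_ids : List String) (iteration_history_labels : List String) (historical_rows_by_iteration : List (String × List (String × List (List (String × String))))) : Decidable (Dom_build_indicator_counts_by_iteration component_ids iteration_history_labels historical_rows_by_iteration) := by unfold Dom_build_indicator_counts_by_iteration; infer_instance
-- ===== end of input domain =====

-- B does no counting during the traversal: it materializes a flat list of
-- (indicator_id, label, is_positive) events and then assembles the nested result by
-- bulk-counting each distinct (indicator, label) key over that event list
-- (objective: simpler decomposition; the return value, including insertion order, is identical).

-- shared input-reading helper: 'm.get(k, dflt)' on an association-list argument (first match)
def pvGetAssocD {β : Type} (m : List (String × β)) (k : String) (dflt : β) : β :=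
  ((m.find? (fun p => p.1 == k)).map (fun p => p.2)).getD dflt

-- '(row.get(k) or "")': a missing key and an empty value both give "" (the values are strings)
def pvGetStrD (row : List (String × String)) (k : String) : String :=
  pvGetAssocD row k ""

-- POSITIVE_EVIDENCE_STATUS_VALUES: a Python set literal of distinct strings, used only for membership
def pvPositiveVals : List String := ["positive", "present", "yes", "true", "1", "supported", "met"]

-- ===== PORT A =====
-- is_positive_scored_row
def pvIsPositive (row : List (String × String)) : Bool :=
  pvPositiveVals.contains (PySem.Str.lower (PySem.Str.strip (pvGetStrD row "evidence_status")))

-- the body of A's innermost loop (one row), statement for statement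
def pvRowA (iteration_history_label : String)
    (d : PySem.Dict String (PySem.Dict String (PySem.Dict String Int)))
    (row : List (String × String)) : PySem.Dict String (PySem.Dict String (PySem.Dict String Int)) :=
  let indicator_id := PySem.Str.strip (pvGetStrD row "indicator_id")
  if indicator_id = "" then d else
  let d := d.setdefault indicator_id PySem.Dict.empty
  let d := d.insert indicator_id
      ((d.getD indicator_id PySem.Dict.empty).setdefault iteration_history_label
        (PySem.Dict.ofList [("positive", (0 : Int)), ("number_scored", (0 : Int))]))
  let d := d.insert indicator_id
      ((d.getD indicator_id PySem.Dict.empty).insert iteration_history_label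
        (((d.getD indicator_id PySem.Dict.empty).getD iteration_history_label PySem.Dict.empty).insert "number_scored"
          (((d.getD indicator_id PySem.Dict.empty).getD iteration_history_label PySem.Dict.empty).getD "number_scored" 0 + 1)))
  if pvIsPositive row then
    d.insert indicator_id
      ((d.getD indicator_id PySem.Dict.empty).insert iteration_history_label
        (((d.getD indicator_id PySem.Dict.empty).getD iteration_history_label PySem.Dict.empty).insert "positive"
          (((d.getD indicator_id PySem.Dict.empty).getD iteration_history_label PySem.Dict.empty).getD "positive" 0 + 1)))
  else d

def build_indicator_counts_by_iteration (component_ids : List String) (iteration_history_labels : List String) (historical_rows_by_iteration : List (String × List (String × List (List (String × String))))) : List (String × List (String × List (String × Int))) :=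
  let counts : PySem.Dict String (PySem.Dict String (PySem.Dict String Int)) :=
    iteration_history_labels.foldl (fun d iteration_history_label =>
      component_ids.foldl (fun d component_id =>
        (pvGetAssocD (pvGetAssocD historical_rows_by_iteration iteration_history_label []) component_id []).foldl
          (pvRowA iteration_history_label) d) d) PySem.Dict.empty
  counts.items.map (fun p => (p.1, p.2.items.map (fun q => (q.1, q.2.items))))

-- ===== PORT B =====
def build_indicator_counts_by_iteration_alt (component_ids : List String) (iteration_history_labels : List String) (historical_rows_by_iteration : List (String × List (String × List (List (String × String))))) : List (String × List (String × List (String × Int))) :=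
  -- stage 1: the event-list comprehension (filter = the 'if' clause, map = the element expression)
  let events : List (String × String × Bool) :=
    iteration_history_labels.flatMap (fun label =>
      component_ids.flatMap (fun component_id =>
        ((pvGetAssocD (pvGetAssocD historical_rows_by_iteration label []) component_id []).filter
            (fun row => !(PySem.Str.strip (pvGetStrD row "indicator_id") == ""))).map
          (fun row => (PySem.Str.strip (pvGetStrD row "indicator_id"), label,
            pvPositiveVals.contains (PySem.Str.lower (PySem.Str.strip (pvGetStrD row "evidence_status")))))))
  let keys : List (String × String) := events.map (fun e => (e.1, e.2.1))
  -- stage 2: 'for ind, label in dict.fromkeys(keys)' (= PySem.List.dedup), cells by list.count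
  let counts : PySem.Dict String (PySem.Dict String (PySem.Dict String Int)) :=
    (PySem.List.dedup keys).foldl (fun res k =>
      let res := res.setdefault k.1 PySem.Dict.empty
      res.insert k.1 ((res.getD k.1 PySem.Dict.empty).insert k.2
        (PySem.Dict.ofList [("positive", (events.count (k.1, k.2, true) : Int)),
                            ("number_scored", (keys.count k : Int))]))) PySem.Dict.empty
  counts.items.map (fun p => (p.1, p.2.items.map (fun q => (q.1, q.2.items))))

-- ===== PRECONDITION & SPEC =====
def Spec_build_indicator_counts_by_iteration (component_ids : List String) (iteration_history_labels : List String) (historical_rows_by_iteration : List (String × List (String × List (List (String × String))))) (out : List (String × List (String × List (String × Int)))) : Prop := out = build_indicator_counts_by_iteration_alt component_ids iteration_history_labels historical_rows_by_iteration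
instance (component_ids : List String) (iteration_history_labels : List String) (historical_rows_by_iteration : List (String × List (String × List (List (String × String))))) (out : List (String × List (String × List (String × Int)))) : Decidable (Spec_build_indicator_counts_by_iteration component_ids iteration_history_labels historical_rows_by_iteration out) := by unfold Spec_build_indicator_counts_by_iteration; infer_instance

-- ===== CLAIM (what is proved, stated in full; the proofs are below) =====
def Claim_equal_build_indicator_counts_by_iteration : Prop := ∀ (component_ids : List String) (iteration_history_labels : List String) (historical_rows_by_iteration : List (String × List (String × List (List (String × String))))), Dom_build_indicator_counts_by_iteration component_ids iteration_history_labels historical_rows_by_iteration → Spec_build_indicator_counts_by_iteration component_ids iteration_history_labels historical_rows_by_iteration (build_indicator_counts_by_iteration component_ids iteration_history_labels historical_rows_by_iteration)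

-- ===== LEMMAS AND PROOFS =====

lemma pv_map_id_of {α : Type} (l : List α) (f : α → α) (h : ∀ a ∈ l, f a = a) : l.map f = l := by
  induction l with
  | nil => rfl
  | cons e l ih => simp [h e (List.mem_cons_self), ih (fun p hp => h p (List.mem_cons_of_mem _ hp))]

lemma pv_setdefault_insert_self {κ ν : Type} [BEq κ] [LawfulBEq κ]
    (d : PySem.Dict κ ν) (k : κ) (e v : ν) :
    (d.setdefault k e).insert k v = d.insert k v := by
  by_cases h : d.contains k = true
  · rw [PySem.Dict.setdefault_of_contains d e h]
  · rw [PySem.Dict.setdefault_of_not_contains d e (by simpa using h), PySem.Dict.insert_insert_self]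

lemma pv_getD_setdefault_self {κ ν : Type} [BEq κ] [LawfulBEq κ]
    (d : PySem.Dict κ ν) (k : κ) (e e' : ν) :
    (d.setdefault k e).getD k e' = (d.get? k).getD e := by
  rw [PySem.Dict.getD_eq_get?_getD, PySem.Dict.get?_setdefault_self]; rfl

lemma pv_getD_setdefault_self' {κ ν : Type} [BEq κ] [LawfulBEq κ]
    (d : PySem.Dict κ ν) (k : κ) (e : ν) :
    (d.setdefault k e).getD k e = d.getD k e := by
  rw [pv_getD_setdefault_self, PySem.Dict.getD_eq_get?_getD]

lemma pv_insert_comm_left {κ ν : Type} [BEq κ] [LawfulBEq κ]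
    (d : PySem.Dict κ ν) (k k' : κ) (v w : ν) (hc : d.contains k = true) (hne : k ≠ k') :
    (d.insert k v).insert k' w = (d.insert k' w).insert k v := by
  apply PySem.Dict.ext
  by_cases hc' : d.contains k' = true
  · rw [PySem.Dict.items_insert, PySem.Dict.items_insert, PySem.Dict.items_insert,
      PySem.Dict.items_insert]
    simp only [PySem.Dict.contains_insert, hc, hc', if_true, Bool.or_true, List.map_map]
    apply List.map_congr_left
    intro p _
    by_cases h1 : p.1 = k <;> by_cases h2 : p.1 = k' <;>
      simp_all [Function.comp, Ne.symm hne]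
  · rw [PySem.Dict.items_insert, PySem.Dict.items_insert, PySem.Dict.items_insert,
      PySem.Dict.items_insert]
    simp [PySem.Dict.contains_insert, hc, hc', Ne.symm hne]

def pvCell (v : Int × Int) : PySem.Dict String Int :=
  PySem.Dict.ofList [("positive", v.1), ("number_scored", v.2)]

def pvUpdCell (b : Bool) (c : PySem.Dict String Int) : PySem.Dict String Int :=
  let c1 := c.insert "number_scored" (c.getD "number_scored" 0 + 1)
  if b then c1.insert "positive" (c1.getD "positive" 0 + 1) else c1

lemma pv_updCell_cell (b : Bool) (p n : Int) :
    pvUpdCell b (pvCell (p, n)) = pvCell ((if b then p + 1 else p), n + 1) := by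
  cases b <;> rfl

-- A's one-row update, rewritten into 'insert the updated cell' form
lemma pv_rowA_eq (lab : String) (d : PySem.Dict String (PySem.Dict String (PySem.Dict String Int)))
    (row : List (String × String)) :
    pvRowA lab d row =
      (if PySem.Str.strip (pvGetStrD row "indicator_id") = "" then d else
        (d.insert (PySem.Str.strip (pvGetStrD row "indicator_id"))
          ((d.getD (PySem.Str.strip (pvGetStrD row "indicator_id")) PySem.Dict.empty).insert lab
            (pvUpdCell (pvIsPositive row)
              (((d.getD (PySem.Str.strip (pvGetStrD row "indicator_id")) PySem.Dict.empty).get? lab).getD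
                (pvCell (0, 0))))))) := by
  unfold pvRowA pvUpdCell
  by_cases h : PySem.Str.strip (pvGetStrD row "indicator_id") = ""
  · simp [h]
  · simp only [h, if_false]
    simp only [pv_getD_setdefault_self', pv_setdefault_insert_self,
      PySem.Dict.getD_insert_self, pv_getD_setdefault_self, PySem.Dict.insert_insert_self]
    by_cases hb : pvIsPositive row <;> simp [hb, pvCell]

-- key of an event; the flat event step (B's counts, done incrementally — proof-side only)
def pvKeyOf (e : String × String × Bool) : String × String := (e.1, e.2.1)

def pvStepA (d : PySem.Dict String (PySem.Dict String (PySem.Dict String Int)))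
    (e : String × String × Bool) : PySem.Dict String (PySem.Dict String (PySem.Dict String Int)) :=
  d.insert e.1 ((d.getD e.1 PySem.Dict.empty).insert e.2.1
    (pvUpdCell e.2.2 (((d.getD e.1 PySem.Dict.empty).get? e.2.1).getD (pvCell (0, 0)))))

def pvStepF (f : PySem.Dict (String × String) (Int × Int))
    (e : String × String × Bool) : PySem.Dict (String × String) (Int × Int) :=
  let pn := f.getD (pvKeyOf e) (0, 0)
  f.insert (pvKeyOf e) ((if e.2.2 then pn.1 + 1 else pn.1), pn.2 + 1)

lemma pv_rows_foldA (lab : String) (rows : List (List (String × String)))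
    (d : PySem.Dict String (PySem.Dict String (PySem.Dict String Int))) :
    rows.foldl (pvRowA lab) d =
      ((rows.filter (fun row => !(PySem.Str.strip (pvGetStrD row "indicator_id") == ""))).map
        (fun row => (PySem.Str.strip (pvGetStrD row "indicator_id"), lab, pvIsPositive row))).foldl
        pvStepA d := by
  induction rows generalizing d with
  | nil => rfl
  | cons row rows ih =>
    by_cases h : PySem.Str.strip (pvGetStrD row "indicator_id") = ""
    · have hguard : (!(PySem.Str.strip (pvGetStrD row "indicator_id") == "")) = false := by
        simp [h]
      rw [List.foldl_cons, pv_rowA_eq, if_pos h, List.filter_cons, hguard]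
      simp only [Bool.false_eq_true, if_false]
      exact ih d
    · have hguard : (!(PySem.Str.strip (pvGetStrD row "indicator_id") == "")) = true := by
        simp [h]
      have hrow : pvRowA lab d row
          = pvStepA d (PySem.Str.strip (pvGetStrD row "indicator_id"), lab, pvIsPositive row) := by
        rw [pv_rowA_eq, if_neg h]
        simp only [pvStepA]
      rw [List.foldl_cons, hrow, List.filter_cons, hguard]
      simp only [if_true, List.map_cons, List.foldl_cons]
      exact ih _

def pvStep2 (res : PySem.Dict String (PySem.Dict String (PySem.Dict String Int)))
    (e : (String × String) × (Int × Int)) : PySem.Dict String (PySem.Dict String (PySem.Dict String Int)) :=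
  res.insert e.1.1 ((res.getD e.1.1 PySem.Dict.empty).insert e.1.2 (pvCell e.2))

def pvAsm (l : List ((String × String) × (Int × Int)))
    (acc : PySem.Dict String (PySem.Dict String (PySem.Dict String Int))) :
    PySem.Dict String (PySem.Dict String (PySem.Dict String Int)) :=
  l.foldl pvStep2 acc

def pvUpdO (i lab : String) (v : Int × Int)
    (d : PySem.Dict String (PySem.Dict String (PySem.Dict String Int))) :
    PySem.Dict String (PySem.Dict String (PySem.Dict String Int)) :=
  d.insert i ((d.getD i PySem.Dict.empty).insert lab (pvCell v))

lemma pv_asm_cons (e l acc) : pvAsm (e :: l) acc = pvAsm l (pvStep2 acc e) := rfl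

lemma pv_asm_get? (l : List ((String × String) × (Int × Int)))
    (acc : PySem.Dict String (PySem.Dict String (PySem.Dict String Int))) (i lab : String)
    (hnd : (l.map (fun p => p.1)).Nodup) :
    ((pvAsm l acc).getD i PySem.Dict.empty).get? lab =
      (l.find? (fun p => p.1 == (i, lab))).elim ((acc.getD i PySem.Dict.empty).get? lab)
        (fun e => some (pvCell e.2)) := by
  induction l generalizing acc with
  | nil => simp [pvAsm]
  | cons e l ih =>
    simp only [List.map_cons, List.nodup_cons] at hnd
    rw [pv_asm_cons, ih _ hnd.2, List.find?_cons]
    by_cases he : e.1 = (i, lab)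
    · have hfind : l.find? (fun p => p.1 == (i, lab)) = none := by
        rw [List.find?_eq_none]
        intro p hp
        simp only [beq_iff_eq]
        intro hpk
        exact hnd.1 (List.mem_map.mpr ⟨p, hp, by rw [hpk, he]⟩)
      simp only [hfind, he, beq_self_eq_true, Option.elim]
      simp [pvStep2, he, PySem.Dict.getD_insert_self, PySem.Dict.get?_insert_self]
    · have : (e.1 == (i, lab)) = false := by simpa using he
      simp only [this]
      cases hf : l.find? (fun p => p.1 == (i, lab)) with
      | some _ => simp [Option.elim]
      | none =>
        simp only [Option.elim]
        by_cases h1 : e.1.1 = i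
        · have h2 : e.1.2 ≠ lab := by
            intro h2; exact he (Prod.ext h1 h2)
          simp [pvStep2, h1, PySem.Dict.getD_insert_self,
            PySem.Dict.get?_insert_of_ne _ _ (Ne.symm h2)]
        · simp [pvStep2, PySem.Dict.getD_insert_of_ne _ _ _ (fun hh => h1 hh.symm)]

lemma pv_updO_updO (i lab : String) (v w : Int × Int) (d) :
    pvUpdO i lab v (pvUpdO i lab w d) = pvUpdO i lab v d := by
  simp [pvUpdO, PySem.Dict.getD_insert_self, PySem.Dict.insert_insert_self]

lemma pv_step2_updO_comm (i lab : String) (v : Int × Int) (d)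
    (e : (String × String) × (Int × Int)) (hne : e.1 ≠ (i, lab))
    (h1 : d.contains i = true) (h2 : (d.getD i PySem.Dict.empty).contains lab = true) :
    pvStep2 (pvUpdO i lab v d) e = pvUpdO i lab v (pvStep2 d e) := by
  by_cases hi : e.1.1 = i
  · have hlab : e.1.2 ≠ lab := fun h => hne (Prod.ext hi h)
    simp only [pvStep2, pvUpdO, hi, PySem.Dict.getD_insert_self,
      PySem.Dict.insert_insert_self]
    rw [pv_insert_comm_left _ lab e.1.2 _ _ h2 (Ne.symm hlab)]
  · simp only [pvStep2, pvUpdO,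
      PySem.Dict.getD_insert_of_ne _ _ _ (fun h => hi (h.symm ▸ rfl) : e.1.1 ≠ i),
      PySem.Dict.getD_insert_of_ne _ _ _ (fun h => hi h.symm : i ≠ e.1.1)]
    rw [pv_insert_comm_left _ i e.1.1 _ _ h1 (fun h => hi h.symm)]

lemma pv_step2_contains (d) (e : (String × String) × (Int × Int)) (i : String)
    (h : d.contains i = true) : (pvStep2 d e).contains i = true := by
  simp [pvStep2, PySem.Dict.contains_insert, h]

lemma pv_step2_inner_contains (d) (e : (String × String) × (Int × Int)) (i lab : String)
    (h : ((d.getD i PySem.Dict.empty).contains lab) = true) :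
    ((pvStep2 d e).getD i PySem.Dict.empty).contains lab = true := by
  by_cases hi : e.1.1 = i
  · simp only [pvStep2, hi, PySem.Dict.getD_insert_self]
    simp [PySem.Dict.contains_insert, h]
  · simpa only [pvStep2, PySem.Dict.getD_insert_of_ne _ _ _ (fun h' => hi h'.symm : i ≠ e.1.1)]
      using h

lemma pv_asm_updO_comm (i lab : String) (v : Int × Int) :
    ∀ (l : List ((String × String) × (Int × Int))), (∀ e ∈ l, e.1 ≠ (i, lab)) →
    ∀ acc, acc.contains i = true → ((acc.getD i PySem.Dict.empty).contains lab) = true →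
    pvAsm l (pvUpdO i lab v acc) = pvUpdO i lab v (pvAsm l acc) := by
  intro l
  induction l with
  | nil => intro _ acc _ _; rfl
  | cons e l ih =>
    intro hne acc h1 h2
    rw [pv_asm_cons, pv_asm_cons,
      pv_step2_updO_comm i lab v acc e (hne e (List.mem_cons_self)) h1 h2,
      ih (fun e' he' => hne e' (List.mem_cons_of_mem _ he')) _
        (pv_step2_contains acc e i h1) (pv_step2_inner_contains acc e i lab h2)]

lemma pv_asm_replace (i lab : String) (v : Int × Int) :
    ∀ (l : List ((String × String) × (Int × Int))),
    (l.map (fun p => p.1)).Nodup → ((i, lab) ∈ l.map (fun p => p.1)) →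
    ∀ acc, pvAsm (l.map (fun p => if p.1 == (i, lab) then ((i, lab), v) else p)) acc
      = pvUpdO i lab v (pvAsm l acc) := by
  intro l
  induction l with
  | nil => intro _ h; simp at h
  | cons e l ih =>
    intro hnd hmem acc
    simp only [List.map_cons, List.nodup_cons] at hnd
    by_cases he : e.1 = (i, lab)
    · have hrest : l.map (fun p => if p.1 == (i, lab) then ((i, lab), v) else p) = l := by
        apply pv_map_id_of
        intro p hp
        have : p.1 ≠ (i, lab) := by
          intro h; exact hnd.1 (List.mem_map.mpr ⟨p, hp, h.trans he.symm⟩)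
        simp [this]
      have hno : ∀ e' ∈ l, e'.1 ≠ (i, lab) := by
        intro p hp h; exact hnd.1 (List.mem_map.mpr ⟨p, hp, by rw [h, he]⟩)
      simp only [List.map_cons, he, beq_self_eq_true, if_true, hrest]
      rw [pv_asm_cons, pv_asm_cons]
      have hstep : pvStep2 acc ((i, lab), v) = pvUpdO i lab v acc := rfl
      have hstep' : pvStep2 acc e = pvUpdO i lab e.2 acc := by
        simp only [pvStep2, pvUpdO, he]
      rw [hstep, hstep', ← pv_updO_updO i lab v e.2 acc,
        pv_asm_updO_comm i lab v l hno _
          (by simp [pvUpdO, PySem.Dict.contains_insert_self])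
          (by simp [pvUpdO, PySem.Dict.getD_insert_self, PySem.Dict.contains_insert_self])]
    · have hb : (e.1 == (i, lab)) = false := by simpa using he
      have hmem' : (i, lab) ∈ l.map (fun p => p.1) := by
        rcases List.mem_map.mp hmem with ⟨p, hp, hpk⟩
        rcases List.mem_cons.mp hp with h | h
        · exact absurd (h ▸ hpk) he
        · exact List.mem_map.mpr ⟨p, h, hpk⟩
      simp only [List.map_cons, hb]
      rw [pv_asm_cons, pv_asm_cons]
      exact ih hnd.2 hmem' (pvStep2 acc e)

lemma pv_asm_insert (f : PySem.Dict (String × String) (Int × Int))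
    (hnd : f.keys.Nodup) (i lab : String) (v : Int × Int) :
    pvAsm (f.insert (i, lab) v).items PySem.Dict.empty
      = pvUpdO i lab v (pvAsm f.items PySem.Dict.empty) := by
  by_cases hc : f.contains (i, lab) = true
  · rw [PySem.Dict.items_insert]
    simp only [hc, if_true]
    exact pv_asm_replace i lab v f.items hnd
      ((PySem.Dict.contains_iff_mem_keys f (i, lab)).mp hc) PySem.Dict.empty
  · rw [PySem.Dict.items_insert]
    simp only [hc]
    show (f.items ++ [((i, lab), v)]).foldl pvStep2 PySem.Dict.empty = _
    rw [List.foldl_append]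
    rfl

-- one flat event preserves the simulation between A's nested dict and the flat (key → counts) dict
lemma pv_event_step (f : PySem.Dict (String × String) (Int × Int)) (hnd : f.keys.Nodup)
    (e : String × String × Bool) :
    (pvStepF f e).keys.Nodup ∧
      pvStepA (pvAsm f.items PySem.Dict.empty) e = pvAsm (pvStepF f e).items PySem.Dict.empty := by
  refine ⟨PySem.Dict.nodup_keys_insert _ _ _ hnd, ?_⟩
  unfold pvStepA pvStepF pvKeyOf
  have hget : (((pvAsm f.items PySem.Dict.empty).getD e.1 PySem.Dict.empty).get? e.2.1) =
      (f.get? (e.1, e.2.1)).map pvCell := by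
    rw [pv_asm_get? f.items PySem.Dict.empty e.1 e.2.1 hnd]
    show _ = ((f.items.find? (fun p => p.1 == (e.1, e.2.1))).map (fun p => p.2)).map pvCell
    cases hf : f.items.find? (fun p => p.1 == (e.1, e.2.1)) with
    | none => simp [Option.elim, PySem.Dict.getD_empty, PySem.Dict.get?_empty]
    | some x => simp [Option.elim]
  rw [hget]
  have hcell : ((f.get? (e.1, e.2.1)).map pvCell).getD (pvCell (0, 0))
      = pvCell (f.getD (e.1, e.2.1) (0, 0)) := by
    rw [PySem.Dict.getD_eq_get?_getD]
    cases f.get? (e.1, e.2.1) <;> rfl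
  rw [hcell]
  have hupd : pvUpdCell e.2.2 (pvCell (f.getD (e.1, e.2.1) (0, 0)))
      = pvCell ((if e.2.2 then (f.getD (e.1, e.2.1) (0, 0)).1 + 1 else (f.getD (e.1, e.2.1) (0, 0)).1),
        (f.getD (e.1, e.2.1) (0, 0)).2 + 1) := by
    have := pv_updCell_cell e.2.2 (f.getD (e.1, e.2.1) (0, 0)).1 (f.getD (e.1, e.2.1) (0, 0)).2
    simpa using this
  rw [hupd, ← pvUpdO, ← pv_asm_insert f hnd]

lemma pv_sim_fold : ∀ (E : List (String × String × Bool)) (f : PySem.Dict (String × String) (Int × Int)),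
    f.keys.Nodup →
    (E.foldl pvStepF f).keys.Nodup ∧
      E.foldl pvStepA (pvAsm f.items PySem.Dict.empty) = pvAsm (E.foldl pvStepF f).items PySem.Dict.empty := by
  intro E
  induction E with
  | nil => intro f hnd; exact ⟨hnd, rfl⟩
  | cons e E ih =>
    intro f hnd
    obtain ⟨hnd', heq⟩ := pv_event_step f hnd e
    simp only [List.foldl_cons, heq]
    exact ih (pvStepF f e) hnd'

-- the per-key counts B computes by scanning
def pvCnt (E : List (String × String × Bool)) (k : String × String) : Int × Int :=
  ((E.count (k.1, k.2, true) : Int), ((E.map pvKeyOf).count k : Int))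

lemma pv_dedup_append (l : List (String × String)) (k : String × String) :
    PySem.List.dedup (l ++ [k]) =
      if k ∈ l then PySem.List.dedup l else PySem.List.dedup l ++ [k] := by
  rw [PySem.List.dedup_eq_ofList, PySem.List.dedup_eq_ofList,
    PySem.Set.ofList_eq_foldl, List.foldl_append, ← PySem.Set.ofList_eq_foldl]
  show PySem.Set.add _ _ = _
  rw [PySem.Set.add]
  by_cases h : k ∈ l
  · simp [PySem.Set.contains, PySem.Set.mem_ofList, h]
  · simp [PySem.Set.contains, PySem.Set.mem_ofList, h]

lemma pv_cnt_of_not_mem (E : List (String × String × Bool)) (k : String × String)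
    (h : k ∉ E.map pvKeyOf) : pvCnt E k = (0, 0) := by
  unfold pvCnt
  have h1 : (E.map pvKeyOf).count k = 0 := List.count_eq_zero.mpr h
  have h2 : E.count (k.1, k.2, true) = 0 := by
    rw [List.count_eq_zero]
    intro hmem
    exact h (List.mem_map.mpr ⟨(k.1, k.2, true), hmem, rfl⟩)
  simp [h1, h2]

lemma pv_cnt_append_self (E : List (String × String × Bool)) (e : String × String × Bool) :
    pvCnt (E ++ [e]) (pvKeyOf e)
      = ((pvCnt E (pvKeyOf e)).1 + (if e.2.2 then 1 else 0), (pvCnt E (pvKeyOf e)).2 + 1) := by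
  obtain ⟨a, b, c⟩ := e
  unfold pvCnt pvKeyOf
  simp only [List.map_append, List.count_append]
  cases c <;> simp

lemma pv_cnt_append_ne (E : List (String × String × Bool)) (e : String × String × Bool)
    (k : String × String) (h : k ≠ pvKeyOf e) : pvCnt (E ++ [e]) k = pvCnt E k := by
  unfold pvCnt
  simp only [List.map_append, List.count_append, List.map_cons, List.map_nil]
  have h1 : [e].count (k.1, k.2, true) = 0 := by
    rw [List.count_eq_zero]
    intro hm
    apply h
    rw [← List.mem_singleton.mp hm]
    rfl
  have h2 : [pvKeyOf e].count k = 0 := by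
    rw [List.count_eq_zero]
    intro hm
    exact h (List.mem_singleton.mp hm)
  simp [h1, h2]

lemma pv_items_foldF : ∀ E : List (String × String × Bool),
    (E.foldl pvStepF PySem.Dict.empty).items
      = (PySem.List.dedup (E.map pvKeyOf)).map (fun k => (k, pvCnt E k)) := by
  intro E
  induction E using List.reverseRecOn with
  | nil => rfl
  | append_singleton E e ih =>
    have hkeys : (E.foldl pvStepF PySem.Dict.empty).keys = PySem.List.dedup (E.map pvKeyOf) := by
      show (E.foldl pvStepF PySem.Dict.empty).items.map (fun p => p.1) = _
      rw [ih, List.map_map]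
      apply pv_map_id_of
      intro a _
      rfl
    have hnd : (E.foldl pvStepF PySem.Dict.empty).keys.Nodup := by
      rw [hkeys]; exact PySem.List.nodup_dedup _
    have hcontains : (E.foldl pvStepF PySem.Dict.empty).contains (pvKeyOf e) = true ↔
        pvKeyOf e ∈ E.map pvKeyOf := by
      rw [PySem.Dict.contains_iff_mem_keys, hkeys, PySem.List.mem_dedup]
    have hget : (E.foldl pvStepF PySem.Dict.empty).getD (pvKeyOf e) (0, 0) = pvCnt E (pvKeyOf e) := by
      by_cases hm : pvKeyOf e ∈ E.map pvKeyOf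
      · have hmem : (pvKeyOf e, pvCnt E (pvKeyOf e)) ∈ (E.foldl pvStepF PySem.Dict.empty).items := by
          rw [ih]
          exact List.mem_map.mpr ⟨pvKeyOf e, (PySem.List.mem_dedup _ _).mpr hm, rfl⟩
        exact PySem.Dict.getD_of_mem_items _ hmem hnd _
      · have hcf : (E.foldl pvStepF PySem.Dict.empty).contains (pvKeyOf e) = false := by
          simpa using mt hcontains.mp hm
        rw [PySem.Dict.getD_of_not_contains _ _ hcf, pv_cnt_of_not_mem E (pvKeyOf e) hm]
    rw [List.foldl_append, List.foldl_cons, List.foldl_nil]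
    rw [show pvStepF (E.foldl pvStepF PySem.Dict.empty) e
        = (E.foldl pvStepF PySem.Dict.empty).insert (pvKeyOf e)
            ((if e.2.2 = true
                then ((E.foldl pvStepF PySem.Dict.empty).getD (pvKeyOf e) (0, 0)).1 + 1
                else ((E.foldl pvStepF PySem.Dict.empty).getD (pvKeyOf e) (0, 0)).1),
             ((E.foldl pvStepF PySem.Dict.empty).getD (pvKeyOf e) (0, 0)).2 + 1) from rfl]
    rw [hget]
    have hval : ((if e.2.2 = true then (pvCnt E (pvKeyOf e)).1 + 1 else (pvCnt E (pvKeyOf e)).1),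
        (pvCnt E (pvKeyOf e)).2 + 1) = pvCnt (E ++ [e]) (pvKeyOf e) := by
      rw [pv_cnt_append_self]
      cases hb : e.2.2 <;> simp
    rw [hval, PySem.Dict.items_insert]
    by_cases hm : pvKeyOf e ∈ E.map pvKeyOf
    · simp only [hcontains.mpr hm, if_true, ih, List.map_map,
        List.map_append, List.map_cons, List.map_nil]
      rw [pv_dedup_append]
      simp only [hm, if_true]
      apply List.map_congr_left
      intro k hk
      by_cases hkk : k = pvKeyOf e
      · simp [Function.comp, hkk]
      · have hb : ((k, pvCnt E k).1 == pvKeyOf e) = false := by simpa using hkk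
        simp only [Function.comp, hb, Bool.false_eq_true, if_false]
        rw [pv_cnt_append_ne E e k hkk]
    · have hcf : (E.foldl pvStepF PySem.Dict.empty).contains (pvKeyOf e) = false := by
        simpa using mt hcontains.mp hm
      simp only [hcf, Bool.false_eq_true, if_false, ih,
        List.map_append, List.map_cons, List.map_nil]
      rw [pv_dedup_append]
      simp only [hm, if_false, List.map_append, List.map_cons, List.map_nil]
      congr 1
      apply List.map_congr_left
      intro k hk
      have hkk : k ≠ pvKeyOf e := fun hh => hm (hh ▸ (PySem.List.mem_dedup _ _).mp hk)
      rw [pv_cnt_append_ne E e k hkk]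

-- B's assembly step is pvStep2 at the (key, counts) pair
lemma pv_stepB_eq (res : PySem.Dict String (PySem.Dict String (PySem.Dict String Int)))
    (k : String × String) (p n : Int) :
    ((res.setdefault k.1 PySem.Dict.empty).insert k.1
      (((res.setdefault k.1 PySem.Dict.empty).getD k.1 PySem.Dict.empty).insert k.2
        (PySem.Dict.ofList [("positive", p), ("number_scored", n)])))
    = pvStep2 res (k, (p, n)) := by
  rw [PySem.Dict.getD_setdefault_self, pv_setdefault_insert_self]
  rfl

-- the core identity on an arbitrary flat event list
lemma pv_core (E : List (String × String × Bool)) :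
    (E.foldl pvStepA PySem.Dict.empty).items.map (fun p => (p.1, p.2.items.map (fun q => (q.1, q.2.items))))
      = ((PySem.List.dedup (E.map pvKeyOf)).foldl (fun res k =>
          (res.setdefault k.1 PySem.Dict.empty).insert k.1
            (((res.setdefault k.1 PySem.Dict.empty).getD k.1 PySem.Dict.empty).insert k.2
              (PySem.Dict.ofList [("positive", (E.count (k.1, k.2, true) : Int)),
                ("number_scored", ((E.map pvKeyOf).count k : Int))]))) PySem.Dict.empty).items.map
          (fun p => (p.1, p.2.items.map (fun q => (q.1, q.2.items)))) := by
  have hsim := pv_sim_fold E PySem.Dict.empty PySem.Dict.nodup_keys_empty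
  have h1 : (PySem.List.dedup (E.map pvKeyOf)).foldl (fun res k =>
        (res.setdefault k.1 PySem.Dict.empty).insert k.1
          (((res.setdefault k.1 PySem.Dict.empty).getD k.1 PySem.Dict.empty).insert k.2
            (PySem.Dict.ofList [("positive", (E.count (k.1, k.2, true) : Int)),
              ("number_scored", ((E.map pvKeyOf).count k : Int))]))) PySem.Dict.empty
      = (PySem.List.dedup (E.map pvKeyOf)).foldl (fun res k => pvStep2 res (k, pvCnt E k)) PySem.Dict.empty := by
    apply PySem.List.foldl_congr_mem
    intro res k _
    exact pv_stepB_eq res k _ _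
  have h2 : ((PySem.List.dedup (E.map pvKeyOf)).map (fun k => (k, pvCnt E k))).foldl pvStep2 PySem.Dict.empty
      = (PySem.List.dedup (E.map pvKeyOf)).foldl (fun res k => pvStep2 res (k, pvCnt E k)) PySem.Dict.empty := by
    rw [List.foldl_map]
  rw [h1, ← h2, ← pv_items_foldF E]
  have hsim2 : E.foldl pvStepA PySem.Dict.empty
      = pvAsm (E.foldl pvStepF PySem.Dict.empty).items PySem.Dict.empty := hsim.2
  rw [hsim2]
  rfl

-- ===== VERDICT (by name: the statement is the Claim_ definition above) =====
theorem build_indicator_counts_by_iteration_spec : Claim_equal_build_indicator_counts_by_iteration := by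
  intro component_ids iteration_history_labels historical_rows_by_iteration _dom
  unfold Spec_build_indicator_counts_by_iteration
  have hA : (iteration_history_labels.foldl (fun d iteration_history_label =>
      component_ids.foldl (fun d component_id =>
        (pvGetAssocD (pvGetAssocD historical_rows_by_iteration iteration_history_label []) component_id []).foldl
          (pvRowA iteration_history_label) d) d) PySem.Dict.empty)
      = (iteration_history_labels.flatMap (fun label =>
          component_ids.flatMap (fun component_id =>
            ((pvGetAssocD (pvGetAssocD historical_rows_by_iteration label []) component_id []).filter
                (fun row => !(PySem.Str.strip (pvGetStrD row "indicator_id") == ""))).map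
              (fun row => (PySem.Str.strip (pvGetStrD row "indicator_id"), label, pvIsPositive row))))).foldl
          pvStepA PySem.Dict.empty := by
    simp only [List.foldl_flatMap]
    apply PySem.List.foldl_congr_mem
    intro d lab _
    apply PySem.List.foldl_congr_mem
    intro d cid _
    exact pv_rows_foldA lab _ d
  show (iteration_history_labels.foldl (fun d iteration_history_label =>
      component_ids.foldl (fun d component_id =>
        (pvGetAssocD (pvGetAssocD historical_rows_by_iteration iteration_history_label []) component_id []).foldl
          (pvRowA iteration_history_label) d) d) PySem.Dict.empty).items.map
        (fun p => (p.1, p.2.items.map (fun q => (q.1, q.2.items))))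
    = _
  rw [hA]
  exact pv_core _
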